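-- pv_equiv track=rewrite | github.com/chtmp223/suri | utils.py | strip_trailing_text
-- ===== SOURCE A (Python) =====
-- def strip_trailing_text(text):
--     """
--     Strip trailing text after the last sentence.
--     If the trailing text contains more than 20 words, do not remove it.
--     """
--     separators = [".", "?", "!", "\n"]
--     last_separator_index = -1
--
--     # Find the last punctuation mark that ends a sentence.
--     for sep in separators:
--         index = text.rfind(sep)
--         if index > last_separator_index:
--             last_separator_index = index
--
--     # Check if the last sentence is shorter than 30 words.
--     if last_separator_index != -1:
--         last_sentence = text[last_separator_index + 1 :].strip()
--         if len(last_sentence.split()) < 30: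
--             return text[: last_separator_index + 1]
--         else:
--             return text
--     else:
--         return text
-- ===== SOURCE B (Python) =====
-- def strip_trailing_text(text):
--     """
--     Strip trailing text after the last sentence.
--     If the trailing text contains 30 or more words, do not remove it.
--     """
--     # Single scan from the end for the last sentence-ending character.
--     i = len(text) - 1
--     while i >= 0 and text[i] not in ".?!\n":
--         i -= 1
--     if i < 0:
--         return text
--     last_sentence = text[i + 1:].strip()
--     if len(last_sentence.split()) >= 30:
--         return text
--     return text[:i + 1]
-- ===== Notes on version B (the rewrite author's own statement) =====
-- stated objective: alternative
-- what changed: Replaces the four separate str.rfind scans (one per separator, folded with a running max) by a single backwards character scan that stops at the first sentence-ending character from the right, with the branch structure inverted (early return when no separator / when the tail is long).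
import Mathlib
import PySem

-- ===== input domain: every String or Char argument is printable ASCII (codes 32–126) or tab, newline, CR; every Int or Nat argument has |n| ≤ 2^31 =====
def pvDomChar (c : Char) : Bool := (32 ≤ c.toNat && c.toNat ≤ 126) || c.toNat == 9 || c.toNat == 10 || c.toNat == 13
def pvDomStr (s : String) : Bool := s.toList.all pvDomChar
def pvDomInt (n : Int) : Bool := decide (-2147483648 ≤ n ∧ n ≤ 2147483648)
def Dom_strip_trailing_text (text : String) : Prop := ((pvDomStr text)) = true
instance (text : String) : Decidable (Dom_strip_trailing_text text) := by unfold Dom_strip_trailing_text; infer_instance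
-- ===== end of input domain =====

-- B replaces A's four rfind scans (folded with a running max) by one backwards character scan; alternative decomposition, same cost.

-- ===== PORT A =====
-- A's for-loop over the separator list, tracking the best rfind result.
def pvAIdx (text : String) : Int :=
  [".", "?", "!", "\n"].foldl
    (fun last_separator_index sep =>
      let index := PySem.Str.rfind text sep
      if index > last_separator_index then index else last_separator_index)
    (-1)

def strip_trailing_text (text : String) : String :=
  let last_separator_index := pvAIdx text
  if last_separator_index ≠ -1 then
    let last_sentence := PySem.Str.strip (PySem.Str.slice text (some (last_separator_index + 1)) none)
    if PySem.List.len (PySem.Str.split₀ last_sentence) < 30 then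
      PySem.Str.slice text none (some (last_separator_index + 1))
    else text
  else text

-- ===== PORT B =====
-- B's while-loop: walk the string from the end (index i) until a separator is found.
def pvRevScan (cs : List Char) (i : Int) : Int :=
  match cs with
  | [] => -1
  | c :: rest => if c ∈ ['.', '?', '!', '\n'] then i else pvRevScan rest (i - 1)

def strip_trailing_text_alt (text : String) : String :=
  let i := pvRevScan text.toList.reverse (PySem.Str.len text - 1)
  if i < 0 then text
  else
    let last_sentence := PySem.Str.strip (PySem.Str.slice text (some (i + 1)) none)
    if 30 ≤ PySem.List.len (PySem.Str.split₀ last_sentence) then text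
    else PySem.Str.slice text none (some (i + 1))

-- ===== PRECONDITION & SPEC =====
def Spec_strip_trailing_text (text : String) (out : String) : Prop := out = strip_trailing_text_alt text
instance (text : String) (out : String) : Decidable (Spec_strip_trailing_text text out) := by unfold Spec_strip_trailing_text; infer_instance

-- ===== CLAIM (what is proved, stated in full; the proofs are below) =====
def Claim_equal_strip_trailing_text : Prop := ∀ (text : String), Dom_strip_trailing_text text → Spec_strip_trailing_text text (strip_trailing_text text)

-- ===== LEMMAS AND PROOFS =====

-- A's loop expressed on the character list (proof helper).
def pvAIdxL (s : List Char) : Int :=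
  [['.'], ['?'], ['!'], ['\n']].foldl
    (fun acc d => if PySem.Chars.rfind s d > acc then PySem.Chars.rfind s d else acc) (-1)

theorem pv_aidx_eq_list (text : String) : pvAIdx text = pvAIdxL text.toList := by
  simp [pvAIdx, pvAIdxL, PySem.Str.rfind_eq, List.foldl]

-- a one-character pattern only looks at the head, so appending behind a nonempty list changes nothing
theorem pv_isPrefixOf_append_singleton (l : List Char) (c d : Char) (h : l ≠ []) :
    [d].isPrefixOf (l ++ [c]) = [d].isPrefixOf l := by
  cases l with
  | nil => exact absurd rfl h
  | cons x xs => simp [List.isPrefixOf]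

theorem pv_isPrefixOf_drop_append (s : List Char) (c d : Char) (k : Nat) (hk : k < s.length) :
    [d].isPrefixOf (List.drop k (s ++ [c])) = [d].isPrefixOf (List.drop k s) := by
  rw [List.drop_append_of_le_length (by omega)]
  apply pv_isPrefixOf_append_singleton
  intro hnil
  have := congrArg List.length hnil
  simp at this
  omega

theorem pv_go_append (s : List Char) (c d : Char) (j : Nat) (hj : j < s.length) :
    PySem.Chars.rfind.go (s ++ [c]) [d] j = PySem.Chars.rfind.go s [d] j := by
  induction j with
  | zero =>
    simp only [PySem.Chars.rfind.go]
    rw [pv_isPrefixOf_append_singleton s c d (by intro h; subst h; simp at hj)]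
  | succ j ih =>
    simp only [PySem.Chars.rfind.go]
    rw [pv_isPrefixOf_drop_append s c d (j + 1) hj, ih (by omega)]

theorem pv_go_le (s sub : List Char) (j : Nat) :
    -1 ≤ PySem.Chars.rfind.go s sub j ∧ PySem.Chars.rfind.go s sub j ≤ (j : Int) := by
  induction j with
  | zero => simp only [PySem.Chars.rfind.go]; split <;> simp
  | succ j ih =>
    simp only [PySem.Chars.rfind.go]
    split
    · constructor <;> push_cast <;> omega
    · exact ⟨ih.1, by push_cast; omega⟩

theorem pv_rfind_bounds (s : List Char) (d : Char) :
    -1 ≤ PySem.Chars.rfind s [d] ∧ PySem.Chars.rfind s [d] ≤ (s.length : Int) - 1 := by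
  unfold PySem.Chars.rfind
  cases s with
  | nil => simp [PySem.Chars.rfind.go, List.isPrefixOf]
  | cons x xs =>
    simp only [List.length_cons, PySem.Chars.rfind.go]
    have hfalse : [d].isPrefixOf (List.drop (xs.length + 1) (x :: xs)) = false := by
      rw [List.drop_eq_nil_of_le (by simp)]; simp [List.isPrefixOf]
    rw [hfalse]
    simp only [Bool.false_eq_true, if_false]
    have := pv_go_le (x :: xs) [d] xs.length
    exact ⟨this.1, by push_cast; omega⟩

theorem pv_rfind_append (s : List Char) (c d : Char) :
    PySem.Chars.rfind (s ++ [c]) [d] =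
      if c = d then (s.length : Int) else PySem.Chars.rfind s [d] := by
  unfold PySem.Chars.rfind
  have hlen : (s ++ [c]).length = s.length + 1 := by simp
  rw [hlen]
  simp only [PySem.Chars.rfind.go]
  have hfalse : [d].isPrefixOf (List.drop (s.length + 1) (s ++ [c])) = false := by
    rw [List.drop_eq_nil_of_le (by simp)]; simp [List.isPrefixOf]
  rw [hfalse]
  simp only [Bool.false_eq_true, if_false]
  cases s with
  | nil =>
    simp only [List.nil_append, List.length_nil, PySem.Chars.rfind.go]
    by_cases h : c = d
    · subst h; simp [List.isPrefixOf]
    · have hp : [d].isPrefixOf [c] = false := by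
        simp [List.isPrefixOf]; exact fun hh => h hh.symm
      rw [hp]
      simp [h, List.isPrefixOf]
  | cons x xs =>
    simp only [List.length_cons, PySem.Chars.rfind.go]
    have hdrop : List.drop (xs.length + 1) ((x :: xs) ++ [c]) = [c] := by
      rw [List.drop_append_of_le_length (by simp)]; simp
    rw [hdrop]
    have hfalse2 : [d].isPrefixOf (List.drop (xs.length + 1) (x :: xs)) = false := by
      rw [List.drop_eq_nil_of_le (by simp)]; simp [List.isPrefixOf]
    rw [hfalse2]
    simp only [Bool.false_eq_true, if_false]
    by_cases h : c = d
    · subst h; simp [List.isPrefixOf]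
    · have hp : [d].isPrefixOf [c] = false := by
        simp [List.isPrefixOf]; exact fun hh => h hh.symm
      rw [hp]
      simp only [Bool.false_eq_true, if_false, if_neg h]
      exact pv_go_append (x :: xs) c d xs.length (by simp)

-- the core: A's folded rfind maximum equals B's backwards scan
theorem pv_idx_eq (s : List Char) :
    pvAIdxL s = pvRevScan s.reverse ((s.length : Int) - 1) := by
  induction s using List.reverseRecOn with
  | nil => decide
  | append_singleton s c ih =>
    have h1 := pv_rfind_bounds s '.'
    have h2 := pv_rfind_bounds s '?'
    have h3 := pv_rfind_bounds s '!'
    have h4 := pv_rfind_bounds s '\n'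
    rw [List.reverse_append, List.reverse_singleton, List.singleton_append,
        show (((s ++ [c]).length : Int) - 1) = (s.length : Int) from by
          push_cast [List.length_append, List.length_singleton]; ring]
    simp only [pvAIdxL, List.foldl, pvRevScan] at ih ⊢
    rw [pv_rfind_append s c '.', pv_rfind_append s c '?', pv_rfind_append s c '!',
        pv_rfind_append s c '\n']
    by_cases e1 : c = '.'
    · subst e1
      rw [if_pos rfl, if_neg (show ¬('.' : Char) = '?' from by decide),
          if_neg (show ¬('.' : Char) = '!' from by decide),
          if_neg (show ¬('.' : Char) = '\n' from by decide),
          if_pos (show ('.' : Char) ∈ ['.', '?', '!', '\n'] from by decide)]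
      split_ifs <;> omega
    by_cases e2 : c = '?'
    · subst e2
      rw [if_neg (show ¬('?' : Char) = '.' from by decide), if_pos rfl,
          if_neg (show ¬('?' : Char) = '!' from by decide),
          if_neg (show ¬('?' : Char) = '\n' from by decide),
          if_pos (show ('?' : Char) ∈ ['.', '?', '!', '\n'] from by decide)]
      split_ifs <;> omega
    by_cases e3 : c = '!'
    · subst e3
      rw [if_neg (show ¬('!' : Char) = '.' from by decide),
          if_neg (show ¬('!' : Char) = '?' from by decide), if_pos rfl,
          if_neg (show ¬('!' : Char) = '\n' from by decide),
          if_pos (show ('!' : Char) ∈ ['.', '?', '!', '\n'] from by decide)]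
      split_ifs <;> omega
    by_cases e4 : c = '\n'
    · subst e4
      rw [if_neg (show ¬('\n' : Char) = '.' from by decide),
          if_neg (show ¬('\n' : Char) = '?' from by decide),
          if_neg (show ¬('\n' : Char) = '!' from by decide), if_pos rfl,
          if_pos (show ('\n' : Char) ∈ ['.', '?', '!', '\n'] from by decide)]
      split_ifs <;> omega
    · rw [if_neg e1, if_neg e2, if_neg e3, if_neg e4,
          if_neg (show ¬ c ∈ ['.', '?', '!', '\n'] from by simp [e1, e2, e3, e4])]
      exact ih

-- B's scan started at length-1 never goes below -1
theorem pv_revScan_ge (cs : List Char) : -1 ≤ pvRevScan cs ((cs.length : Int) - 1) := by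
  induction cs with
  | nil => simp [pvRevScan]
  | cons c rest ih =>
    simp only [pvRevScan]
    split
    · omega
    · have h : ((c :: rest).length : Int) - 1 - 1 = (rest.length : Int) - 1 := by
        push_cast [List.length_cons]; ring
      rw [h]
      exact ih

-- ===== VERDICT (by name: the statement is the Claim_ definition above) =====
theorem strip_trailing_text_spec : Claim_equal_strip_trailing_text := by
  intro text _
  unfold Spec_strip_trailing_text strip_trailing_text strip_trailing_text_alt
  have hidx : pvAIdx text = pvRevScan text.toList.reverse (PySem.Str.len text - 1) := by
    rw [pv_aidx_eq_list, pv_idx_eq, PySem.Str.len_eq]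
  have hge : -1 ≤ pvRevScan text.toList.reverse (PySem.Str.len text - 1) := by
    rw [PySem.Str.len_eq]
    have := pv_revScan_ge text.toList.reverse
    simpa using this
  rw [hidx]
  set i := pvRevScan text.toList.reverse (PySem.Str.len text - 1) with hi
  by_cases hneg : i < 0
  · rw [if_neg (by omega), if_pos hneg]
  · rw [if_pos (by omega), if_neg hneg]
    by_cases hcnt : PySem.List.len (PySem.Str.split₀ (PySem.Str.strip (PySem.Str.slice text (some (i + 1)) none))) < 30
    · rw [if_pos hcnt, if_neg (by omega)]
    · rw [if_neg hcnt, if_pos (by omega)]
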